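-- pv_equiv track=rewrite | github.com/encgoo/hackerrank | Search/meet_in_the_middle.py | meet_in_the_middle
-- ===== SOURCE A (Python) =====
-- def meet_in_the_middle(l1, l2, l3, l4):
--     """
--     Meet in the middle. Assume that we are looking for a+b+c+d =0. We can
--     cache all the possible a+b results in the first for loop.
--
--     :param lst:
--     :return:
--     """
--     cache = {}
--
--     for i in range(len(l1)):
--         for j in range(len(l2)):
--             d = l1[i] + l2[j]
--             if d in cache:
--                 cache[d] += 1
--             else:
--                 cache[d] = 1
--     count = 0
--     for i in range(len(l3)):
--         for j in range(len(l4)):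
--             d = -l3[i] - l4[j]
--             if d in cache:
--                 count += cache[d]
--
--     return count
-- ===== SOURCE B (Python) =====
-- def meet_in_the_middle(l1, l2, l3, l4):
--     sums = sorted(a + b for a in l1 for b in l2)
--
--     def lower(x):  # first index with sums[i] >= x (hand-written binary search)
--         lo, hi = 0, len(sums)
--         while lo < hi:
--             mid = (lo + hi) // 2
--             if sums[mid] < x:
--                 lo = mid + 1
--             else:
--                 hi = mid
--         return lo
--
--     def upper(x):  # first index with sums[i] > x
--         lo, hi = 0, len(sums)
--         while lo < hi:
--             mid = (lo + hi) // 2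
--             if sums[mid] <= x:
--                 lo = mid + 1
--             else:
--                 hi = mid
--         return lo
--
--     count = 0
--     for c in l3:
--         for d in l4:
--             t = -c - d
--             count += upper(t) - lower(t)
--     return count
-- ===== Notes on version B (the rewrite author's own statement) =====
-- stated objective: alternative
-- what changed: B replaces A's hash-table cache entirely: it sorts the list of all l1+l2 sums and, for each l3/l4 pair, counts occurrences of the complement with two hand-written binary searches (upper - lower) on the sorted array, instead of A's dictionary counting and lookup.
import Mathlib
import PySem

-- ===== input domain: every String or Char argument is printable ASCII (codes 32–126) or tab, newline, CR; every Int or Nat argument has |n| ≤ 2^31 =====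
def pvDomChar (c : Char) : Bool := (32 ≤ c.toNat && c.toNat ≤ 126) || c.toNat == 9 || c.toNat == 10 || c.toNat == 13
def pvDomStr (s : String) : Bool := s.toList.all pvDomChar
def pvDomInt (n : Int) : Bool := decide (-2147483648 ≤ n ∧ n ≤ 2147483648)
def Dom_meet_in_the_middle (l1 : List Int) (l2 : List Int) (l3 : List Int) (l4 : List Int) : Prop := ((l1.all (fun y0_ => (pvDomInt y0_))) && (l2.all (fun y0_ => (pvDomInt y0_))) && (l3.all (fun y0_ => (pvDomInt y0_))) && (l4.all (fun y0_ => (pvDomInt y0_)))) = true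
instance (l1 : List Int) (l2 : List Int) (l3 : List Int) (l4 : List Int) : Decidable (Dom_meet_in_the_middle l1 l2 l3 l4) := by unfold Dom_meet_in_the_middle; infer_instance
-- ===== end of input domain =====

-- B drops A's hash-table cache entirely: it sorts the list of all l1+l2 sums once and counts each
-- complement with two hand-written binary searches (alternative algorithm, same order of growth up
-- to the sorting log factor).

-- ===== PORT A =====
def meet_in_the_middle (l1 : List Int) (l2 : List Int) (l3 : List Int) (l4 : List Int) : Int :=
  let cache : PySem.Dict Int Int :=
    (PySem.List.pyRange 0 (PySem.List.len l1) 1).foldl (fun c i =>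
      (PySem.List.pyRange 0 (PySem.List.len l2) 1).foldl (fun c j =>
        let d := PySem.List.pyGetD l1 i 0 + PySem.List.pyGetD l2 j 0
        if c.contains d then c.modify d 0 (· + 1) else c.insert d 1) c) PySem.Dict.empty
  (PySem.List.pyRange 0 (PySem.List.len l3) 1).foldl (fun count i =>
    (PySem.List.pyRange 0 (PySem.List.len l4) 1).foldl (fun count j =>
      let d := -(PySem.List.pyGetD l3 i 0) - PySem.List.pyGetD l4 j 0
      if cache.contains d then count + cache.getD d 0 else count) count) 0

-- ===== PORT B =====
-- 'while lo < hi: mid = (lo+hi)//2; if sums[mid] < x: lo = mid+1 else hi = mid' (Source B's lower)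
def pvLowerLoop (sums : List Int) (x : Int) (lo hi : Nat) : Nat :=
  if _h : lo < hi then
    let mid := (lo + hi) / 2
    if sums.getD mid 0 < x then pvLowerLoop sums x (mid + 1) hi
    else pvLowerLoop sums x lo mid
  else lo
termination_by hi - lo
decreasing_by all_goals omega

-- Source B's upper: same loop with 'sums[mid] <= x'
def pvUpperLoop (sums : List Int) (x : Int) (lo hi : Nat) : Nat :=
  if _h : lo < hi then
    let mid := (lo + hi) / 2
    if sums.getD mid 0 ≤ x then pvUpperLoop sums x (mid + 1) hi
    else pvUpperLoop sums x lo mid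
  else lo
termination_by hi - lo
decreasing_by all_goals omega

def meet_in_the_middle_alt (l1 : List Int) (l2 : List Int) (l3 : List Int) (l4 : List Int) : Int :=
  let sums := PySem.List.sorted (l1.flatMap (fun a => l2.map (a + ·))) (fun z => z) false
  l3.foldl (fun count c =>
    l4.foldl (fun count d =>
      let t := -c - d
      count + ((pvUpperLoop sums t 0 sums.length : Int) - (pvLowerLoop sums t 0 sums.length : Int)))
      count) 0

-- ===== PRECONDITION & SPEC =====
def Spec_meet_in_the_middle (l1 : List Int) (l2 : List Int) (l3 : List Int) (l4 : List Int) (out : Int) : Prop := out = meet_in_the_middle_alt l1 l2 l3 l4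
instance (l1 : List Int) (l2 : List Int) (l3 : List Int) (l4 : List Int) (out : Int) : Decidable (Spec_meet_in_the_middle l1 l2 l3 l4 out) := by unfold Spec_meet_in_the_middle; infer_instance

-- ===== CLAIM (what is proved, stated in full; the proofs are below) =====
def Claim_equal_meet_in_the_middle : Prop := ∀ (l1 : List Int) (l2 : List Int) (l3 : List Int) (l4 : List Int), Dom_meet_in_the_middle l1 l2 l3 l4 → Spec_meet_in_the_middle l1 l2 l3 l4 (meet_in_the_middle l1 l2 l3 l4)

-- ===== LEMMAS AND PROOFS =====

-- nested element folds are a fold over the flattened pair-sum list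
theorem foldl_flatMap_helper {α β γ : Type} (g : α → List β) (f : γ → β → γ) :
    ∀ (l : List α) (init : γ),
      (l.flatMap g).foldl f init = l.foldl (fun acc a => (g a).foldl f acc) init := by
  intro l
  induction l with
  | nil => intro init; rfl
  | cons a t ih => intro init; simp [List.flatMap_cons, List.foldl_append, ih]

-- the multiset of pairwise sums
def pairSums (xs ys : List Int) : List Int := xs.flatMap (fun a => ys.map (a + ·))

-- A's cache-building branch is exactly Counter's update step
theorem cache_step_eq_modify (c : PySem.Dict Int Int) (k : Int) :
    (if c.contains k then c.modify k 0 (· + 1) else c.insert k 1) = c.modify k 0 (· + 1) := by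
  by_cases h : c.contains k = true
  · simp [h]
  · have h0 : c.getD k 0 = 0 :=
      PySem.Dict.getD_of_not_contains c 0 (by simpa using h)
    simp [h, PySem.Dict.modify, h0]

-- A's first double loop builds Counter(pairSums l1 l2)
theorem cache_eq_counter (l1 l2 : List Int) :
    ((PySem.List.pyRange 0 (PySem.List.len l1) 1).foldl (fun c i =>
      (PySem.List.pyRange 0 (PySem.List.len l2) 1).foldl (fun c j =>
        if c.contains (PySem.List.pyGetD l1 i 0 + PySem.List.pyGetD l2 j 0) then
          c.modify (PySem.List.pyGetD l1 i 0 + PySem.List.pyGetD l2 j 0) 0 (· + 1)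
        else c.insert (PySem.List.pyGetD l1 i 0 + PySem.List.pyGetD l2 j 0) 1) c)
      (PySem.Dict.empty : PySem.Dict Int Int))
    = PySem.Dict.counter (pairSums l1 l2) := by
  refine (PySem.List.foldl_pyRange_zero_pyGetD l1 0
      (fun (c : PySem.Dict Int Int) a => (PySem.List.pyRange 0 (PySem.List.len l2) 1).foldl (fun c j =>
        if c.contains (a + PySem.List.pyGetD l2 j 0) then
          c.modify (a + PySem.List.pyGetD l2 j 0) 0 (· + 1)
        else c.insert (a + PySem.List.pyGetD l2 j 0) 1) c) PySem.Dict.empty).trans ?_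
  have hinner : ∀ (acc : PySem.Dict Int Int), ∀ a ∈ l1,
      (PySem.List.pyRange 0 (PySem.List.len l2) 1).foldl (fun c j =>
        if c.contains (a + PySem.List.pyGetD l2 j 0) then
          c.modify (a + PySem.List.pyGetD l2 j 0) 0 (· + 1)
        else c.insert (a + PySem.List.pyGetD l2 j 0) 1) acc
      = l2.foldl (fun c b =>
          if c.contains (a + b) then c.modify (a + b) 0 (· + 1) else c.insert (a + b) 1) acc := by
    intro acc a _
    exact PySem.List.foldl_pyRange_zero_pyGetD l2 0
        (fun c b => if c.contains (a + b) then c.modify (a + b) 0 (· + 1) else c.insert (a + b) 1) acc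
  rw [PySem.List.foldl_congr_mem _ _ _ _ hinner]
  rw [PySem.Dict.counter_eq_foldl]
  unfold pairSums
  rw [foldl_flatMap_helper]
  apply PySem.List.foldl_congr_mem
  intro acc a _
  rw [List.foldl_map]
  apply PySem.List.foldl_congr_mem
  intro acc2 b _
  exact cache_step_eq_modify acc2 (a + b)

-- A computes the complement-count sum over pairSums l3 l4
theorem meet_A_eq (l1 l2 l3 l4 : List Int) :
    meet_in_the_middle l1 l2 l3 l4
      = ((pairSums l3 l4).map (fun t => ((pairSums l1 l2).count (-t) : Int))).sum := by
  simp only [meet_in_the_middle]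
  rw [cache_eq_counter]
  refine (PySem.List.foldl_pyRange_zero_pyGetD l3 0
      (fun count c => (PySem.List.pyRange 0 (PySem.List.len l4) 1).foldl (fun count j =>
        if (PySem.Dict.counter (pairSums l1 l2)).contains (-c - PySem.List.pyGetD l4 j 0) then
          count + (PySem.Dict.counter (pairSums l1 l2)).getD (-c - PySem.List.pyGetD l4 j 0) 0
        else count) count) 0).trans ?_
  have hinner : ∀ (acc : Int), ∀ c ∈ l3,
      (PySem.List.pyRange 0 (PySem.List.len l4) 1).foldl (fun count j =>
        if (PySem.Dict.counter (pairSums l1 l2)).contains (-c - PySem.List.pyGetD l4 j 0) then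
          count + (PySem.Dict.counter (pairSums l1 l2)).getD (-c - PySem.List.pyGetD l4 j 0) 0
        else count) acc
      = (l4.map (c + ·)).foldl
          (fun count t => count + ((pairSums l1 l2).count (-t) : Int)) acc := by
    intro acc c _
    refine (PySem.List.foldl_pyRange_zero_pyGetD l4 0
        (fun count dd =>
          if (PySem.Dict.counter (pairSums l1 l2)).contains (-c - dd) then
            count + (PySem.Dict.counter (pairSums l1 l2)).getD (-c - dd) 0 else count) acc).trans ?_
    rw [List.foldl_map]
    apply PySem.List.foldl_congr_mem
    intro cnt dd _
    have hk : -c - dd = -(c + dd) := by ring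
    rw [hk]
    by_cases h : (PySem.Dict.counter (pairSums l1 l2)).contains (-(c + dd)) = true
    · rw [if_pos h, PySem.Dict.getD_counter]
    · have h' : ((pairSums l1 l2).contains (-(c + dd))) = false := by
        rw [← PySem.Dict.contains_counter]; simpa using h
      have hz : ((pairSums l1 l2).count (-(c + dd)) : Int) = 0 := by
        have hm : (-(c + dd)) ∉ pairSums l1 l2 := by simpa using h'
        exact_mod_cast List.count_eq_zero.mpr hm
      rw [if_neg h, hz]
      ring
  rw [PySem.List.foldl_congr_mem _ _ _ _ hinner]
  rw [← foldl_flatMap_helper (fun c => l4.map (c + ·))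
      (fun count t => count + ((pairSums l1 l2).count (-t) : Int)) l3 0]
  rw [PySem.List.foldl_add]
  simp [pairSums]

-- counting by a partition point: if the first n positions satisfy p and the rest do not,
-- then countP p = n
theorem countP_eq_of_partition (p : Int → Bool) :
    ∀ (s : List Int) (n : Nat), n ≤ s.length →
      (∀ (k : Nat) (h : k < s.length), k < n → p s[k] = true) →
      (∀ (k : Nat) (h : k < s.length), n ≤ k → p s[k] = false) →
      s.countP p = n := by
  intro s
  induction s with
  | nil =>
    intro n hn _ _
    simp only [List.countP_nil]
    simp only [List.length_nil] at hn
    omega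
  | cons a t ih =>
    intro n hn h1 h2
    cases n with
    | zero =>
      have ha : p a = false := h2 0 (by simp) (Nat.zero_le _)
      have ht : t.countP p = 0 := by
        refine ih 0 (Nat.zero_le _) (by intro k hk hk0; omega) ?_
        intro k hk _
        have := h2 (k + 1) (by simpa using Nat.succ_lt_succ hk) (Nat.zero_le _)
        simpa using this
      simp [ha, ht]
    | succ m =>
      have ha : p a = true := h1 0 (by simp) (Nat.succ_pos m)
      have ht : t.countP p = m := by
        refine ih m (by simpa using hn) ?_ ?_
        · intro k hk hkm
          have := h1 (k + 1) (by simpa using Nat.succ_lt_succ hk) (by omega)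
          simpa using this
        · intro k hk hmk
          have := h2 (k + 1) (by simpa using Nat.succ_lt_succ hk) (by omega)
          simpa using this
      simp [ha, ht]

-- the lower-bound binary search returns countP (· < x) on a sorted list
theorem pvLowerLoop_eq (s : List Int) (x : Int) (hs : s.Pairwise (· ≤ ·)) :
    ∀ (lo hi : Nat), lo ≤ hi → hi ≤ s.length →
      (∀ (k : Nat) (h : k < s.length), k < lo → s[k] < x) →
      (∀ (k : Nat) (h : k < s.length), hi ≤ k → ¬ s[k] < x) →
      pvLowerLoop s x lo hi = s.countP (fun y => decide (y < x)) := by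
  have hmono : ∀ (i j : Nat) (hi : i < s.length) (hj : j < s.length), i ≤ j → s[i] ≤ s[j] := by
    intro i j hi hj hij
    rcases Nat.lt_or_ge i j with h | h
    · exact (List.pairwise_iff_getElem.mp hs) i j hi hj h
    · have : i = j := by omega
      subst this; exact le_refl _
  intro lo hi
  induction lo, hi using pvLowerLoop.induct s x with
  | case1 lo hi h mid hlt ih =>
    intro hlohi hhile h1 h2
    have hmid : mid < s.length := by
      have : mid < hi := by simp only [mid]; omega
      omega
    rw [pvLowerLoop]
    simp only [dif_pos h]
    have hget : s.getD mid 0 = s[mid] := List.getD_eq_getElem s 0 hmid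
    rw [if_pos (by rw [hget] at hlt ⊢; exact hlt)] at *
    refine ih ?_ hhile ?_ h2
    · simp only [mid]; omega
    · intro k hk hkm
      have : s[k] ≤ s[mid] := hmono k mid hk hmid (by omega)
      have hx : s[mid] < x := by rw [hget] at hlt; exact hlt
      omega
  | case2 lo hi h mid hnlt ih =>
    intro hlohi hhile h1 h2
    have hmidlt : mid < hi := by simp only [mid]; omega
    have hmid : mid < s.length := by omega
    rw [pvLowerLoop]
    simp only [dif_pos h]
    rw [if_neg hnlt]
    refine ih (by simp only [mid]; omega) (by omega) h1 ?_
    · intro k hk hmk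
      have : s[mid] ≤ s[k] := hmono mid k hmid hk hmk
      have hx : ¬ s[mid] < x := by
        rw [List.getD_eq_getElem s 0 hmid] at hnlt; exact hnlt
      omega
  | case3 lo hi h =>
    intro hlohi hhile h1 h2
    have hlh : lo = hi := by omega
    subst hlh
    rw [pvLowerLoop]
    simp only [dif_neg h]
    exact (countP_eq_of_partition _ s lo hhile
      (fun k hk hkl => by simpa using h1 k hk hkl)
      (fun k hk hl => by simpa using h2 k hk hl)).symm

-- the upper-bound binary search returns countP (· ≤ x) on a sorted list
theorem pvUpperLoop_eq (s : List Int) (x : Int) (hs : s.Pairwise (· ≤ ·)) :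
    ∀ (lo hi : Nat), lo ≤ hi → hi ≤ s.length →
      (∀ (k : Nat) (h : k < s.length), k < lo → s[k] ≤ x) →
      (∀ (k : Nat) (h : k < s.length), hi ≤ k → ¬ s[k] ≤ x) →
      pvUpperLoop s x lo hi = s.countP (fun y => decide (y ≤ x)) := by
  have hmono : ∀ (i j : Nat) (hi : i < s.length) (hj : j < s.length), i ≤ j → s[i] ≤ s[j] := by
    intro i j hi hj hij
    rcases Nat.lt_or_ge i j with h | h
    · exact (List.pairwise_iff_getElem.mp hs) i j hi hj h
    · have : i = j := by omega
      subst this; exact le_refl _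
  intro lo hi
  induction lo, hi using pvUpperLoop.induct s x with
  | case1 lo hi h mid hlt ih =>
    intro hlohi hhile h1 h2
    have hmid : mid < s.length := by
      have : mid < hi := by simp only [mid]; omega
      omega
    rw [pvUpperLoop]
    simp only [dif_pos h]
    have hget : s.getD mid 0 = s[mid] := List.getD_eq_getElem s 0 hmid
    rw [if_pos hlt]
    refine ih ?_ hhile ?_ h2
    · simp only [mid]; omega
    · intro k hk hkm
      have : s[k] ≤ s[mid] := hmono k mid hk hmid (by omega)
      have hx : s[mid] ≤ x := by rw [hget] at hlt; exact hlt
      omega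
  | case2 lo hi h mid hnlt ih =>
    intro hlohi hhile h1 h2
    have hmidlt : mid < hi := by simp only [mid]; omega
    have hmid : mid < s.length := by omega
    rw [pvUpperLoop]
    simp only [dif_pos h]
    rw [if_neg hnlt]
    refine ih (by simp only [mid]; omega) (by omega) h1 ?_
    · intro k hk hmk
      have : s[mid] ≤ s[k] := hmono mid k hmid hk hmk
      have hx : ¬ s[mid] ≤ x := by
        rw [List.getD_eq_getElem s 0 hmid] at hnlt; exact hnlt
      omega
  | case3 lo hi h =>
    intro hlohi hhile h1 h2
    have hlh : lo = hi := by omega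
    subst hlh
    rw [pvUpperLoop]
    simp only [dif_neg h]
    exact (countP_eq_of_partition _ s lo hhile
      (fun k hk hkl => by simpa using h1 k hk hkl)
      (fun k hk hl => by simpa using h2 k hk hl)).symm

-- countP (≤ x) splits as countP (< x) plus the multiplicity of x
theorem countP_le_split (x : Int) : ∀ (s : List Int),
    s.countP (fun y => decide (y ≤ x)) = s.countP (fun y => decide (y < x)) + s.count x := by
  intro s
  induction s with
  | nil => simp
  | cons a t ih =>
    rcases lt_trichotomy a x with h | h | h
    · simp [ih, le_of_lt h, h, ne_of_lt h]
      omega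
    · subst h
      simp [ih]
      omega
    · simp [List.count_cons, ih, not_le_of_gt h, not_lt_of_gt h]
      omega

-- upper(t) - lower(t) on the sorted pair-sum list is the multiplicity of t among the l1+l2 sums
theorem bisect_diff_eq_count (l1 l2 : List Int) (t : Int) :
    ((pvUpperLoop (PySem.List.sorted (pairSums l1 l2) (fun z => z) false) t 0
        (PySem.List.sorted (pairSums l1 l2) (fun z => z) false).length : Int)
      - (pvLowerLoop (PySem.List.sorted (pairSums l1 l2) (fun z => z) false) t 0
        (PySem.List.sorted (pairSums l1 l2) (fun z => z) false).length : Int))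
    = ((pairSums l1 l2).count t : Int) := by
  set s := PySem.List.sorted (pairSums l1 l2) (fun z => z) false with hsdef
  have hs : s.Pairwise (· ≤ ·) := by
    have := PySem.List.sorted_pairwise (xs := pairSums l1 l2) (key := fun z => z)
    simpa [hsdef] using this
  have hu : pvUpperLoop s t 0 s.length = s.countP (fun y => decide (y ≤ t)) :=
    pvUpperLoop_eq s t hs 0 s.length (Nat.zero_le _) (le_refl _)
      (fun k hk h0 => by omega) (fun k hk hl => by omega)
  have hl : pvLowerLoop s t 0 s.length = s.countP (fun y => decide (y < t)) :=
    pvLowerLoop_eq s t hs 0 s.length (Nat.zero_le _) (le_refl _)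
      (fun k hk h0 => by omega) (fun k hk hl => by omega)
  have hperm : s.Perm (pairSums l1 l2) := PySem.List.sorted_perm _ _ _
  have hcnt : s.count t = (pairSums l1 l2).count t := hperm.count_eq t
  rw [hu, hl, countP_le_split]
  rw [hcnt]
  push_cast
  ring

-- B computes the same complement-count sum over pairSums l3 l4
theorem meet_B_eq (l1 l2 l3 l4 : List Int) :
    meet_in_the_middle_alt l1 l2 l3 l4
      = ((pairSums l3 l4).map (fun t => ((pairSums l1 l2).count (-t) : Int))).sum := by
  simp only [meet_in_the_middle_alt]
  have hinner : ∀ (acc : Int), ∀ c ∈ l3,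
      l4.foldl (fun count d =>
        count + ((pvUpperLoop (PySem.List.sorted (l1.flatMap (fun a => l2.map (a + ·))) (fun z => z) false) (-c - d) 0
            (PySem.List.sorted (l1.flatMap (fun a => l2.map (a + ·))) (fun z => z) false).length : Int)
          - (pvLowerLoop (PySem.List.sorted (l1.flatMap (fun a => l2.map (a + ·))) (fun z => z) false) (-c - d) 0
            (PySem.List.sorted (l1.flatMap (fun a => l2.map (a + ·))) (fun z => z) false).length : Int))) acc
      = (l4.map (c + ·)).foldl
          (fun count t => count + ((pairSums l1 l2).count (-t) : Int)) acc := by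
    intro acc c _
    rw [List.foldl_map]
    apply PySem.List.foldl_congr_mem
    intro cnt d _
    have hk : -c - d = -(c + d) := by ring
    rw [hk]
    have := bisect_diff_eq_count l1 l2 (-(c + d))
    simp only [pairSums] at this ⊢
    rw [this]
  rw [PySem.List.foldl_congr_mem _ _ _ _ hinner]
  rw [← foldl_flatMap_helper (fun c => l4.map (c + ·))
      (fun count t => count + ((pairSums l1 l2).count (-t) : Int)) l3 0]
  rw [PySem.List.foldl_add]
  simp [pairSums]

-- ===== VERDICT (by name: the statement is the Claim_ definition above) =====
theorem meet_in_the_middle_spec : Claim_equal_meet_in_the_middle := by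
  intro l1 l2 l3 l4 _
  unfold Spec_meet_in_the_middle
  rw [meet_A_eq, meet_B_eq]
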